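-- pv_equiv track=rewrite | github.com/BryceFuller/Embed | EmbedHelper.py | directedToUndirected
-- ===== SOURCE A (Python) =====
-- def directedToUndirected(coupling):
--     UndirectedCoupling = {}
--     for key in coupling.keys():
--         UndirectedCoupling[key] = tuple(coupling[key])
--     for key in coupling.keys():
--         for value in coupling[key]:
--             if value in UndirectedCoupling:
--                 if key not in UndirectedCoupling[value]:
--                     UndirectedCoupling[value] = UndirectedCoupling[value] + (key,)
--             else:
--                 UndirectedCoupling[value] = (key,)
--     return UndirectedCoupling
-- ===== SOURCE B (Python) =====
-- def directedToUndirected(coupling):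
--     # Build a reverse-adjacency index in one pass, then merge it with the
--     # original rows in a second pass (transpose-then-merge decomposition).
--     rev = {}
--     for k, vs in coupling.items():
--         for v in vs:
--             rev.setdefault(v, []).append(k)
--     out = {}
--     for k, vs in coupling.items():
--         t = tuple(vs)
--         for r in rev.get(k, ()):
--             if r not in t:
--                 t = t + (r,)
--         out[k] = t
--     for v, ks in rev.items():
--         if v not in out:
--             t = ()
--             for r in ks:
--                 if r not in t:
--                     t = t + (r,)
--             out[v] = t
--     return out
-- ===== Notes on version B (the rewrite author's own statement) =====
-- stated objective: alternative
-- what changed: A scatters reverse edges into the result dict while walking the edges; B first builds a reverse-adjacency index (transpose) in one pass and then constructs the output in a separate merge pass over the rows plus a pass over the leftover reverse entries.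
import Mathlib
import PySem

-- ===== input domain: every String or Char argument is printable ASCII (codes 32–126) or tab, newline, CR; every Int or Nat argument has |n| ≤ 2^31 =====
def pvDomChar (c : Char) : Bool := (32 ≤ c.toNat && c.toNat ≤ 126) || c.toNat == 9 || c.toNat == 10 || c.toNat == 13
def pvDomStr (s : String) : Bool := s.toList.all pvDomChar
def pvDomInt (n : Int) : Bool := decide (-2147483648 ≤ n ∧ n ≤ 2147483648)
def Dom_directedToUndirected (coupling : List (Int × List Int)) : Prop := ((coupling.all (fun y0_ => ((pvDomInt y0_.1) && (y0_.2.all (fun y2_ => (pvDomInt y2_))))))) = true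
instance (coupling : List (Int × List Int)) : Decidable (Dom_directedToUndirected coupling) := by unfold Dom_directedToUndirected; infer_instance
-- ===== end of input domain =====

-- B replaces A's edge-by-edge scatter into the result dict by a transpose-then-merge
-- decomposition (build the reverse-adjacency index first, then merge); alternative, not faster.

-- ===== PORT A =====
-- body of A's inner double loop: one directed edge (key, value) applied to the growing dict
def pvAStep (u : PySem.Dict Int (List Int)) (k v : Int) : PySem.Dict Int (List Int) :=
  if (PySem.Dict.get? u v).isSome then
    if k ∈ PySem.Dict.getD u v [] then u
    else PySem.Dict.insert u v (PySem.Dict.getD u v [] ++ [k])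
  else PySem.Dict.insert u v [k]

def directedToUndirected (coupling : List (Int × List Int)) : List (Int × List Int) :=
  let c : PySem.Dict Int (List Int) := PySem.Dict.mk coupling
  let u0 := (PySem.Dict.keys c).foldl
      (fun u k => PySem.Dict.insert u k (PySem.Dict.getD c k [])) PySem.Dict.empty
  let u1 := (PySem.Dict.keys c).foldl
      (fun u k => (PySem.Dict.getD c k []).foldl (fun u v => pvAStep u k v) u) u0
  u1.items

-- ===== PORT B =====
-- B's incremental dedup loop: 'for r in ks: if r not in t: t = t + (r,)'
def pvDedup (t : List Int) (ks : List Int) : List Int :=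
  ks.foldl (fun t r => if r ∈ t then t else t ++ [r]) t

def directedToUndirected_alt (coupling : List (Int × List Int)) : List (Int × List Int) :=
  -- pass 1: reverse-adjacency index rev (rev.setdefault(v, []).append(k))
  let rev : PySem.Dict Int (List Int) := coupling.foldl
      (fun r kv => kv.2.foldl (fun r v => PySem.Dict.modify r v [] (· ++ [kv.1])) r)
      PySem.Dict.empty
  -- pass 2: each original row, extended by its deduped reverse neighbours
  let out : PySem.Dict Int (List Int) := coupling.foldl
      (fun out kv => PySem.Dict.insert out kv.1 (pvDedup kv.2 (PySem.Dict.getD rev kv.1 [])))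
      PySem.Dict.empty
  -- pass 3: leftover reverse entries for nodes that are not rows of coupling
  let out2 := rev.items.foldl
      (fun out p => if (PySem.Dict.get? out p.1).isSome then out
                    else PySem.Dict.insert out p.1 (pvDedup [] p.2))
      out
  out2.items

-- ===== PRECONDITION & SPEC =====
-- Pre_ excludes association lists with duplicate keys: they do not denote any Python dict
-- (a Python dict argument cannot contain a duplicate key), so A is never called on them.
def Pre_directedToUndirected (coupling : List (Int × List Int)) : Prop :=
  (coupling.map Prod.fst).Nodup
instance (coupling : List (Int × List Int)) : Decidable (Pre_directedToUndirected coupling) := by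
  unfold Pre_directedToUndirected; infer_instance

def pvWitness_directedToUndirected : (List (Int × List Int)) := [(0, [1, 2]), (1, [2, 1]), (5, [])]

def Spec_directedToUndirected (coupling : List (Int × List Int)) (out : List (Int × List Int)) : Prop := out = directedToUndirected_alt coupling
instance (coupling : List (Int × List Int)) (out : List (Int × List Int)) : Decidable (Spec_directedToUndirected coupling out) := by unfold Spec_directedToUndirected; infer_instance

-- ===== CLAIM (what is proved, stated in full; the proofs are below) =====
def Claim_equal_directedToUndirected : Prop := ∀ (coupling : List (Int × List Int)), Dom_directedToUndirected coupling → Pre_directedToUndirected coupling → Spec_directedToUndirected coupling (directedToUndirected coupling)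

-- ===== LEMMAS AND PROOFS =====

-- the directed edge list of `coupling`, in A's (and B's) traversal order
def pvEdges (c : List (Int × List Int)) : List (Int × Int) :=
  c.flatMap (fun kv => kv.2.map (fun v => (kv.1, v)))

-- the reverse-adjacency dict of an edge list
def pvRev (E : List (Int × Int)) : PySem.Dict Int (List Int) :=
  E.foldl (fun r p => PySem.Dict.modify r p.2 [] (· ++ [p.1])) PySem.Dict.empty

-- the merged output, as a function of the rows and a reverse index
def pvMergeList (c : List (Int × List Int)) (r : PySem.Dict Int (List Int)) :
    List (Int × List Int) :=
  c.map (fun kv => (kv.1, pvDedup kv.2 (PySem.Dict.getD r kv.1 []))) ++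
  (r.items.filter (fun p => !((c.map Prod.fst).contains p.1))).map
    (fun p => (p.1, pvDedup [] p.2))

theorem pvDedup_app2 (t l1 l2 : List Int) :
    pvDedup t (l1 ++ l2) = pvDedup (pvDedup t l1) l2 := List.foldl_append ..

theorem pv_insert_get_self (d : PySem.Dict Int (List Int)) (v : Int) (w : List Int)
    (hnd : d.keys.Nodup) (h : d.get? v = some w) : d.insert v w = d := by
  apply PySem.Dict.ext
  rw [PySem.Dict.items_insert_of_contains _ _ (by rw [PySem.Dict.contains_eq_isSome_get?, h]; rfl)]
  nth_rewrite 2 [show d.items = d.items.map id from (List.map_id d.items).symm]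
  apply List.map_congr_left
  intro p hp
  by_cases hpv : p.1 = v
  · have hg : d.get? p.1 = some p.2 := PySem.Dict.get?_of_mem_items d (by cases p; exact hp) hnd
    rw [hpv, h] at hg
    have hw : w = p.2 := by simpa using hg
    cases p with
    | mk a b =>
      simp only [id]
      simp at hpv hw
      simp [hpv, hw]
  · simp [hpv]

theorem pvAStep_eq (u : PySem.Dict Int (List Int)) (k v : Int) (hnd : u.keys.Nodup) :
    pvAStep u k v = u.insert v (pvDedup (u.getD v []) [k]) := by
  unfold pvAStep
  by_cases hs : (PySem.Dict.get? u v).isSome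
  · obtain ⟨cur, hcur⟩ := Option.isSome_iff_exists.mp hs
    have hgd : u.getD v [] = cur := PySem.Dict.getD_of_get?_eq_some u [] hcur
    rw [hgd] at *
    by_cases hk : k ∈ cur
    · simp [hs, hk, pvDedup, pv_insert_get_self u v cur hnd hcur]
    · simp [hs, hk, pvDedup]
  · have hgd : u.getD v [] = [] := PySem.Dict.getD_of_get?_eq_none u [] (Option.not_isSome_iff_eq_none.mp hs)
    simp [hs, hgd, pvDedup]

theorem pv_get?_mk_append (l1 l2 : List (Int × List Int)) (x : Int) :
    (PySem.Dict.mk (l1 ++ l2)).get? x =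
      ((PySem.Dict.mk l1).get? x).or ((PySem.Dict.mk l2).get? x) := by
  induction l1 with
  | nil => simp [PySem.Dict.get?]
  | cons p t ih =>
    rw [List.cons_append, PySem.Dict.get?_mk_cons, PySem.Dict.get?_mk_cons]
    by_cases h : p.1 == x <;> simp [h, ih]

theorem pv_get?_mk_map (c : List (Int × List Int)) (G : Int → List Int → List Int) (x : Int) :
    (PySem.Dict.mk (c.map (fun kv => (kv.1, G kv.1 kv.2)))).get? x =
      ((PySem.Dict.mk c).get? x).map (G x) := by
  induction c with
  | nil => simp [PySem.Dict.get?]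
  | cons p t ih =>
    rw [List.map_cons, PySem.Dict.get?_mk_cons, PySem.Dict.get?_mk_cons]
    by_cases h : p.1 == x
    · have : p.1 = x := by simpa using h
      simp [this]
    · simp [h, ih]

theorem pv_get?_mk_filter (l : List (Int × List Int)) (q : Int → Bool) (x : Int) :
    (PySem.Dict.mk (l.filter (fun p => q p.1))).get? x =
      if q x then (PySem.Dict.mk l).get? x else none := by
  induction l with
  | nil => simp [PySem.Dict.get?]
  | cons p t ih =>
    rw [PySem.Dict.get?_mk_cons]
    by_cases hq : q p.1
    · rw [List.filter_cons_of_pos (by simpa using hq), PySem.Dict.get?_mk_cons]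
      by_cases h : p.1 == x
      · have : p.1 = x := by simpa using h
        simp [← this, hq]
      · simp [h, ih]
    · rw [List.filter_cons_of_neg (by simpa using hq)]
      by_cases h : p.1 == x
      · have : p.1 = x := by simpa using h
        rw [ih]; simp [← this, hq]
      · simp [h, ih]

theorem pv_filter_map_replace_neg (l : List (Int × List Int)) (v : Int) (w : List Int)
    (q : Int → Bool) (hq : q v = false) :
    ((l.map (fun p => if p.1 == v then (v, w) else p)).filter (fun p => q p.1)) =
      l.filter (fun p => q p.1) := by
  induction l with
  | nil => rfl
  | cons p t ih =>
    simp only [List.map_cons]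
    by_cases h : p.1 = v
    · rw [if_pos (by simpa using h), List.filter_cons_of_neg (by simpa using hq),
        List.filter_cons_of_neg (by simp [h, hq])]
      exact ih
    · rw [if_neg (by simpa using h)]
      by_cases hqp : q p.1
      · rw [List.filter_cons_of_pos (by simpa using hqp),
          List.filter_cons_of_pos (by simpa using hqp), ih]
      · rw [List.filter_cons_of_neg (by simpa using hqp),
          List.filter_cons_of_neg (by simpa using hqp)]
        exact ih

theorem pv_filter_map_replace_pos (l : List (Int × List Int)) (v : Int) (w : List Int)
    (q : Int → Bool) :
    ((l.map (fun p => if p.1 == v then (v, w) else p)).filter (fun p => q p.1)) =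
      (l.filter (fun p => q p.1)).map (fun p => if p.1 == v then (v, w) else p) := by
  induction l with
  | nil => rfl
  | cons p t ih =>
    simp only [List.map_cons]
    by_cases h : p.1 = v
    · rw [if_pos (by simpa using h)]
      by_cases hq : q v
      · rw [List.filter_cons_of_pos (by simpa using hq),
          List.filter_cons_of_pos (by simp [h, hq]), List.map_cons,
          if_pos (by simpa using h), ih]
      · rw [List.filter_cons_of_neg (by simpa using hq),
          List.filter_cons_of_neg (by simp [h, hq])]
        exact ih
    · rw [if_neg (by simpa using h)]
      by_cases hq : q p.1
      · rw [List.filter_cons_of_pos (by simpa using hq),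
          List.filter_cons_of_pos (by simpa using hq), List.map_cons,
          if_neg (by simpa using h), ih]
      · rw [List.filter_cons_of_neg (by simpa using hq),
          List.filter_cons_of_neg (by simpa using hq)]
        exact ih

theorem pvMerge_keys_nodup (c : List (Int × List Int)) (r : PySem.Dict Int (List Int))
    (hc : (c.map Prod.fst).Nodup) (hr : r.keys.Nodup) :
    ((pvMergeList c r).map Prod.fst).Nodup := by
  unfold pvMergeList
  rw [List.map_append, List.map_map, List.map_map]
  have h1 : (c.map (Prod.fst ∘ fun kv => (kv.1, pvDedup kv.2 (PySem.Dict.getD r kv.1 [])))) = c.map Prod.fst := by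
    apply List.map_congr_left; intro p _; rfl
  have h2 : ((r.items.filter (fun p => !((c.map Prod.fst).contains p.1))).map
      (Prod.fst ∘ fun p => (p.1, pvDedup [] p.2))) =
      (r.items.filter (fun p => !((c.map Prod.fst).contains p.1))).map Prod.fst := by
    apply List.map_congr_left; intro p _; rfl
  rw [h1, h2]
  apply List.Nodup.append hc
  · have hsub : (r.items.filter (fun p => !((c.map Prod.fst).contains p.1))).Sublist r.items :=
      List.filter_sublist
    have hkeys : r.keys = r.items.map Prod.fst := rfl
    exact ((hsub.map Prod.fst).nodup (by rw [← hkeys]; exact hr))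
  · intro x hx hy
    obtain ⟨p, hp, rfl⟩ := List.mem_map.mp hy
    have h2 : p.1 ∉ c.map Prod.fst := by
      have := (List.mem_filter.mp hp).2; simpa using this
    exact h2 hx

theorem pvMerge_get? (c : List (Int × List Int)) (r : PySem.Dict Int (List Int)) (x : Int) :
    (PySem.Dict.mk (pvMergeList c r)).get? x =
      (((PySem.Dict.mk c).get? x).map (fun w => pvDedup w (PySem.Dict.getD r x []))).or
        (if !((c.map Prod.fst).contains x) then (r.get? x).map (fun w => pvDedup [] w)
         else none) := by
  unfold pvMergeList
  rw [pv_get?_mk_append]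
  have h1 : (PySem.Dict.mk (c.map (fun kv => (kv.1, pvDedup kv.2 (PySem.Dict.getD r kv.1 []))))).get? x
      = ((PySem.Dict.mk c).get? x).map (fun w => pvDedup w (PySem.Dict.getD r x [])) :=
    pv_get?_mk_map c (fun k w => pvDedup w (PySem.Dict.getD r k [])) x
  have h2 : (PySem.Dict.mk ((r.items.filter (fun p => !((c.map Prod.fst).contains p.1))).map
        (fun p => (p.1, pvDedup [] p.2)))).get? x
      = ((PySem.Dict.mk (r.items.filter (fun p => !((c.map Prod.fst).contains p.1)))).get? x).map
          (fun w => pvDedup [] w) :=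
    pv_get?_mk_map (r.items.filter (fun p => !((c.map Prod.fst).contains p.1)))
      (fun _ w => pvDedup [] w) x
  have h3 : (PySem.Dict.mk (r.items.filter (fun p => !((c.map Prod.fst).contains p.1)))).get? x
      = if (fun y => !((c.map Prod.fst).contains y)) x then (PySem.Dict.mk r.items).get? x else none :=
    pv_get?_mk_filter r.items (fun y => !((c.map Prod.fst).contains y)) x
  rw [h1, h2, h3]
  show _ = (Option.map (fun w => pvDedup w (r.getD x [])) (({ items := c } : PySem.Dict Int (List Int)).get? x)).or _
  by_cases h : (c.map Prod.fst).contains x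
  · rw [if_neg (by show ¬(!(c.map Prod.fst).contains x) = true; rw [h]; simp),
      if_neg (by rw [h]; simp)]
    simp
  · have hF : (c.map Prod.fst).contains x = false := eq_false_of_ne_true h
    rw [if_pos (by show (!(c.map Prod.fst).contains x) = true; rw [hF]; rfl),
      if_pos (by rw [hF]; rfl)]

theorem pvStep_comm (c : List (Int × List Int)) (r : PySem.Dict Int (List Int)) (k v : Int)
    (hc : (c.map Prod.fst).Nodup) (hr : r.keys.Nodup) :
    pvAStep (PySem.Dict.mk (pvMergeList c r)) k v =
      PySem.Dict.mk (pvMergeList c (r.insert v (r.getD v [] ++ [k]))) := by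
  have hcK : (PySem.Dict.mk c).keys.Nodup := by simpa using hc
  have hnd : (PySem.Dict.mk (pvMergeList c r)).keys.Nodup := by
    simpa [PySem.Dict.keys] using pvMerge_keys_nodup c r hc hr
  rw [pvAStep_eq _ k v hnd]
  by_cases hvc : v ∈ c.map Prod.fst
  · -- v is a row of c
    obtain ⟨kv, hkvc, hkv1⟩ := List.mem_map.mp hvc
    have hgc : (PySem.Dict.mk c).get? v = some kv.2 := by
      apply PySem.Dict.get?_of_mem_items _ _ hcK
      show (v, kv.2) ∈ c
      rw [← hkv1]; exact hkvc
    have hcontv : (c.map Prod.fst).contains v = true := by simpa using hvc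
    have dget : (PySem.Dict.mk (pvMergeList c r)).get? v
        = some (pvDedup kv.2 (PySem.Dict.getD r v [])) := by
      rw [pvMerge_get?, hgc]; rfl
    have hgdD : (PySem.Dict.mk (pvMergeList c r)).getD v []
        = pvDedup kv.2 (PySem.Dict.getD r v []) :=
      PySem.Dict.getD_of_get?_eq_some _ _ dget
    apply PySem.Dict.ext
    rw [PySem.Dict.items_insert_of_contains _ _
      (by rw [PySem.Dict.contains_eq_isSome_get?, dget]; rfl)]
    rw [hgdD]
    show (pvMergeList c r).map _ = pvMergeList c (r.insert v (r.getD v [] ++ [k]))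
    unfold pvMergeList
    rw [List.map_append]
    congr 1
    · -- first part
      rw [List.map_map]
      apply List.map_congr_left
      intro kv' hkv'
      by_cases h1 : kv'.1 = v
      · have hval : kv'.2 = kv.2 := by
          have := PySem.Dict.get?_of_mem_items (PySem.Dict.mk c)
            (show (v, kv'.2) ∈ c from by rw [← h1]; exact hkv') hcK
          rw [hgc] at this; exact (Option.some_inj.mp this).symm
        simp only [Function.comp]
        rw [if_pos (by simpa using h1), h1, PySem.Dict.getD_insert_self, hval, pvDedup_app2]
      · simp only [Function.comp]
        rw [if_neg (by simpa using h1), PySem.Dict.getD_insert_of_ne _ _ _ h1]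
    · -- second part
      rw [List.map_map]
      have hmap : ((r.items.filter (fun p => !((c.map Prod.fst).contains p.1))).map
          ((fun p => if p.1 == v then (v, pvDedup (pvDedup kv.2 (PySem.Dict.getD r v [])) [k]) else p)
            ∘ (fun p => (p.1, pvDedup [] p.2)))) =
          (r.items.filter (fun p => !((c.map Prod.fst).contains p.1))).map
            (fun p => (p.1, pvDedup [] p.2)) := by
        apply List.map_congr_left
        intro p hp
        have hpne : p.1 ≠ v := by
          intro hpv
          have := (List.mem_filter.mp hp).2
          rw [hpv, hcontv] at this; simp at this
        simp only [Function.comp]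
        rw [if_neg (by simpa using hpne)]
      rw [hmap]
      by_cases hrv : r.contains v
      · rw [PySem.Dict.items_insert_of_contains _ _ hrv]
        have hflt : ((r.items.map (fun p => if p.1 == v then (v, r.getD v [] ++ [k]) else p)).filter
            (fun p => !((c.map Prod.fst).contains p.1))) =
            r.items.filter (fun p => !((c.map Prod.fst).contains p.1)) :=
          pv_filter_map_replace_neg r.items v (r.getD v [] ++ [k])
            (fun y => !((c.map Prod.fst).contains y)) (by show (!(c.map Prod.fst).contains v) = false; rw [hcontv]; rfl)
        rw [hflt]
      · rw [PySem.Dict.items_insert_of_not_contains _ _ (eq_false_of_ne_true hrv),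
          List.filter_append]
        have hone : (([(v, r.getD v [] ++ [k])] : List (Int × List Int)).filter
            (fun p => !((c.map Prod.fst).contains p.1))) = [] := by
          rw [List.filter_cons, List.filter_nil]
          have : (!(c.map Prod.fst).contains ((v, r.getD v [] ++ [k]) : Int × List Int).1) = false := by
            rw [show (((v, r.getD v [] ++ [k]) : Int × List Int).1 : Int) = v from rfl, hcontv]; rfl
          rw [this]; simp
        rw [hone, List.append_nil]
  · -- v is not a row of c
    have hcontv : (c.map Prod.fst).contains v = false := by simpa using hvc
    have hgc : (PySem.Dict.mk c).get? v = none := by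
      rw [PySem.Dict.get?_eq_none_iff_not_mem_keys]
      simpa using hvc
    by_cases hrv : r.contains v
    · -- v already in rev
      have hsome : (r.get? v).isSome := by
        rw [← PySem.Dict.contains_eq_isSome_get?]; exact hrv
      obtain ⟨ks, hks⟩ := Option.isSome_iff_exists.mp hsome
      have hksD : r.getD v [] = ks := PySem.Dict.getD_of_get?_eq_some _ _ hks
      have dget : (PySem.Dict.mk (pvMergeList c r)).get? v = some (pvDedup [] ks) := by
        rw [pvMerge_get?, hgc, hcontv, hks]; rfl
      have hgdD : (PySem.Dict.mk (pvMergeList c r)).getD v [] = pvDedup [] ks :=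
        PySem.Dict.getD_of_get?_eq_some _ _ dget
      apply PySem.Dict.ext
      rw [PySem.Dict.items_insert_of_contains _ _
        (by rw [PySem.Dict.contains_eq_isSome_get?, dget]; rfl)]
      rw [hgdD]
      show (pvMergeList c r).map _ = pvMergeList c (r.insert v (r.getD v [] ++ [k]))
      unfold pvMergeList
      rw [List.map_append]
      congr 1
      · rw [List.map_map]
        apply List.map_congr_left
        intro kv' hkv'
        have h1 : kv'.1 ≠ v := by
          intro h; exact hvc (h ▸ List.mem_map_of_mem hkv')
        simp only [Function.comp]
        rw [if_neg (by simpa using h1), PySem.Dict.getD_insert_of_ne _ _ _ h1]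
      · rw [List.map_map, PySem.Dict.items_insert_of_contains _ _ hrv]
        have hflt : ((r.items.map (fun p => if p.1 == v then (v, r.getD v [] ++ [k]) else p)).filter
            (fun p => !((c.map Prod.fst).contains p.1))) =
            (r.items.filter (fun p => !((c.map Prod.fst).contains p.1))).map
              (fun p => if p.1 == v then (v, r.getD v [] ++ [k]) else p) :=
          pv_filter_map_replace_pos r.items v (r.getD v [] ++ [k])
            (fun y => !((c.map Prod.fst).contains y))
        rw [hflt, List.map_map]
        apply List.map_congr_left
        intro p hp
        have hpmem : p ∈ r.items := (List.mem_filter.mp hp).1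
        by_cases h1 : p.1 = v
        · simp [Function.comp, h1, hksD, pvDedup_app2]
        · simp [Function.comp, h1]
    · -- v brand new
      have hrvF : r.contains v = false := eq_false_of_ne_true hrv
      have dget : (PySem.Dict.mk (pvMergeList c r)).get? v = none := by
        rw [pvMerge_get?, hgc, hcontv]
        rw [show r.get? v = none from by
          rw [← Option.not_isSome_iff_eq_none, ← PySem.Dict.contains_eq_isSome_get?]
          simp [hrvF]]
        rfl
      have hgdD : (PySem.Dict.mk (pvMergeList c r)).getD v [] = [] :=
        PySem.Dict.getD_of_get?_eq_none _ _ dget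
      have hksD : r.getD v [] = [] := PySem.Dict.getD_of_not_contains _ _ hrvF
      apply PySem.Dict.ext
      rw [PySem.Dict.items_insert_of_not_contains _ _
        (by rw [PySem.Dict.contains_eq_isSome_get?, dget]; rfl)]
      rw [hgdD]
      show pvMergeList c r ++ [(v, pvDedup [] [k])]
          = pvMergeList c (r.insert v (r.getD v [] ++ [k]))
      unfold pvMergeList
      rw [PySem.Dict.items_insert_of_not_contains _ _ hrvF, List.filter_append,
        List.map_append, List.append_assoc]
      congr 1
      · apply List.map_congr_left
        intro kv' hkv'
        have h1 : kv'.1 ≠ v := by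
          intro h; exact hvc (h ▸ List.mem_map_of_mem hkv')
        rw [PySem.Dict.getD_insert_of_ne _ _ _ h1]
      · congr 1
        have hone : (([(v, r.getD v [] ++ [k])] : List (Int × List Int)).filter
            (fun p => !((c.map Prod.fst).contains p.1))) = [(v, r.getD v [] ++ [k])] := by
          rw [List.filter_cons, List.filter_nil]
          have : (!(c.map Prod.fst).contains ((v, r.getD v [] ++ [k]) : Int × List Int).1) = true := by
            rw [show (((v, r.getD v [] ++ [k]) : Int × List Int).1 : Int) = v from rfl, hcontv]; rfl
          rw [this]; simp
        rw [hone, hksD]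
        simp [pvDedup]

theorem pvRev_nodup (E : List (Int × Int)) : (pvRev E).keys.Nodup :=
  PySem.Dict.nodup_keys_foldl_modify_key E (fun p => p.2) []
    (fun _ p => (· ++ [p.1])) PySem.Dict.empty (by simp)

theorem pv_modify_eq_insert (r : PySem.Dict Int (List Int)) (v : Int) (f : List Int → List Int) :
    PySem.Dict.modify r v [] f = r.insert v (f (r.getD v [])) :=
  PySem.Dict.ext_iff.mpr rfl

theorem pvScatter_eq (c : List (Int × List Int)) (hc : (c.map Prod.fst).Nodup)
    (E : List (Int × Int)) :
    E.foldl (fun u p => pvAStep u p.1 p.2) (PySem.Dict.mk c) =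
      PySem.Dict.mk (pvMergeList c (pvRev E)) := by
  induction E using List.reverseRecOn with
  | nil =>
    show PySem.Dict.mk c = PySem.Dict.mk (pvMergeList c PySem.Dict.empty)
    unfold pvMergeList
    apply PySem.Dict.ext
    show c = c.map (fun kv => (kv.1, pvDedup kv.2 (PySem.Dict.getD PySem.Dict.empty kv.1 []))) ++ _
    rw [show ((PySem.Dict.empty : PySem.Dict Int (List Int)).items.filter
        (fun p => !((c.map Prod.fst).contains p.1))) = [] from rfl]
    simp only [List.map_nil, List.append_nil]
    rw [show (fun kv : Int × List Int => (kv.1, pvDedup kv.2 (PySem.Dict.getD PySem.Dict.empty kv.1 []))) =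
        (fun kv : Int × List Int => (kv.1, kv.2)) from by
      funext kv; rw [PySem.Dict.getD_empty]; rfl]
    simp
  | append_singleton E p ih =>
    rw [List.foldl_append, ih]
    show pvAStep (PySem.Dict.mk (pvMergeList c (pvRev E))) p.1 p.2 = _
    have hrev : pvRev (E ++ [p]) = (pvRev E).insert p.2 ((pvRev E).getD p.2 [] ++ [p.1]) := by
      unfold pvRev
      rw [List.foldl_append, List.foldl_cons, List.foldl_nil, pv_modify_eq_insert]
    rw [pvStep_comm c (pvRev E) p.1 p.2 hc (pvRev_nodup E), hrev]

theorem pvA_eq (c : List (Int × List Int)) (hc : (c.map Prod.fst).Nodup) :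
    directedToUndirected c =
      ((pvEdges c).foldl (fun u p => pvAStep u p.1 p.2) (PySem.Dict.mk c)).items := by
  have hcK : (PySem.Dict.mk c).keys.Nodup := by simpa using hc
  show ((PySem.Dict.keys (PySem.Dict.mk c)).foldl
      (fun u k => (PySem.Dict.getD (PySem.Dict.mk c) k []).foldl (fun u v => pvAStep u k v) u)
      ((PySem.Dict.keys (PySem.Dict.mk c)).foldl
        (fun u k => PySem.Dict.insert u k (PySem.Dict.getD (PySem.Dict.mk c) k []))
        PySem.Dict.empty)).items = _
  -- the copy loop rebuilds the dict itself
  have hu0 : ((PySem.Dict.keys (PySem.Dict.mk c)).foldl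
      (fun u k => PySem.Dict.insert u k (PySem.Dict.getD (PySem.Dict.mk c) k []))
      PySem.Dict.empty) = PySem.Dict.mk c := by
    apply PySem.Dict.ext
    have hfresh := PySem.Dict.items_foldl_insert_fresh (PySem.Dict.keys (PySem.Dict.mk c))
      (fun a => a) (fun a => PySem.Dict.getD (PySem.Dict.mk c) a []) PySem.Dict.empty
      (fun a _ => PySem.Dict.contains_empty a)
      (by simpa using hcK)
    rw [hfresh]
    rw [show ((PySem.Dict.empty : PySem.Dict Int (List Int)).items) = [] from rfl,
      List.nil_append]
    exact (PySem.Dict.items_eq_map_keys (PySem.Dict.mk c) hcK []).symm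
  rw [hu0]
  -- the nested scatter loop is the fold over the edge list
  congr 1
  show (c.map Prod.fst).foldl
      (fun u k => (PySem.Dict.getD (PySem.Dict.mk c) k []).foldl (fun u v => pvAStep u k v) u)
      (PySem.Dict.mk c) = _
  rw [List.foldl_map]
  have hcong : List.foldl (fun x (y : Int × List Int) =>
        List.foldl (fun u v => pvAStep u y.1 v) x ((PySem.Dict.mk c).getD y.1 []))
        (PySem.Dict.mk c) c
      = List.foldl (fun x (y : Int × List Int) =>
        List.foldl (fun u v => pvAStep u y.1 v) x y.2) (PySem.Dict.mk c) c := by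
    apply PySem.List.foldl_congr_mem
    intro acc kv hkv
    rw [PySem.Dict.getD_of_mem_items (PySem.Dict.mk c)
      (show (kv.1, kv.2) ∈ c from by simpa using hkv) hcK]
  rw [hcong]
  have hcong2 : List.foldl (fun x (y : Int × List Int) =>
        List.foldl (fun u v => pvAStep u y.1 v) x y.2) (PySem.Dict.mk c) c
      = List.foldl (fun x (y : Int × List Int) =>
        List.foldl (fun u (p : Int × Int) => pvAStep u p.1 p.2) x
          (y.2.map (fun v => (y.1, v)))) (PySem.Dict.mk c) c := by
    apply PySem.List.foldl_congr_mem
    intro acc kv _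
    rw [List.foldl_map]
  rw [hcong2]
  unfold pvEdges
  rw [← List.foldl_flatMap]

theorem pv_fold_guard (ps : List (Int × List Int)) (out : PySem.Dict Int (List Int))
    (g : Int × List Int → List Int) (hnd : (ps.map Prod.fst).Nodup) :
    (ps.foldl (fun out p => if (PySem.Dict.get? out p.1).isSome then out
        else PySem.Dict.insert out p.1 (g p)) out).items =
      out.items ++ (ps.filter (fun p => !(out.contains p.1))).map (fun p => (p.1, g p)) := by
  induction ps generalizing out with
  | nil => simp
  | cons p t ih =>
    have hnd' : (t.map Prod.fst).Nodup := (List.nodup_cons.mp (by simpa using hnd)).2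
    have hpt : p.1 ∉ t.map Prod.fst := (List.nodup_cons.mp (by simpa using hnd)).1
    rw [List.foldl_cons]
    by_cases h : (PySem.Dict.get? out p.1).isSome
    · rw [if_pos h, ih _ hnd',
        List.filter_cons_of_neg (by
          show ¬(!(out.contains p.1)) = true
          rw [PySem.Dict.contains_eq_isSome_get?, h]; simp)]
    · rw [if_neg h, ih _ hnd']
      have hcf : out.contains p.1 = false := by
        rw [PySem.Dict.contains_eq_isSome_get?]; exact eq_false_of_ne_true h
      have hfc : List.filter (fun q => !((out.insert p.1 (g p)).contains q.1)) t
          = List.filter (fun q => !(out.contains q.1)) t := by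
        apply List.filter_congr
        intro q hq
        have hne : q.1 ≠ p.1 := by
          intro hq1; exact hpt (hq1 ▸ List.mem_map_of_mem hq)
        rw [PySem.Dict.contains_insert,
          show (q.1 == p.1) = false from by simpa using hne]
        rfl
      rw [PySem.Dict.items_insert_of_not_contains _ _ hcf, hfc,
        List.filter_cons_of_pos (by rw [hcf]; rfl), List.map_cons, List.append_assoc,
        List.singleton_append]

theorem pvB_eq (c : List (Int × List Int)) (hc : (c.map Prod.fst).Nodup) :
    directedToUndirected_alt c = pvMergeList c (pvRev (pvEdges c)) := by
  -- B's nested rev loop is pvRev of the edge list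
  have hrev : (c.foldl
      (fun r kv => kv.2.foldl (fun r v => PySem.Dict.modify r v [] (· ++ [kv.1])) r)
      PySem.Dict.empty) = pvRev (pvEdges c) := by
    unfold pvRev pvEdges
    have hcong : List.foldl (fun r (kv : Int × List Int) =>
          kv.2.foldl (fun r v => PySem.Dict.modify r v [] (· ++ [kv.1])) r)
          PySem.Dict.empty c
        = List.foldl (fun r (kv : Int × List Int) =>
          List.foldl (fun r (p : Int × Int) => PySem.Dict.modify r p.2 [] (· ++ [p.1])) r
            (kv.2.map (fun v => (kv.1, v)))) PySem.Dict.empty c := by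
      apply PySem.List.foldl_congr_mem
      intro acc kv _
      rw [List.foldl_map]
    rw [hcong, ← List.foldl_flatMap]
  simp only [directedToUndirected_alt]
  rw [hrev]
  have hndR : ((pvRev (pvEdges c)).items.map Prod.fst).Nodup := pvRev_nodup (pvEdges c)
  have hout1 : (List.foldl (fun out kv => PySem.Dict.insert out kv.1
        (pvDedup kv.2 (PySem.Dict.getD (pvRev (pvEdges c)) kv.1 [])))
        PySem.Dict.empty c).items
      = c.map (fun kv => (kv.1, pvDedup kv.2 (PySem.Dict.getD (pvRev (pvEdges c)) kv.1 []))) := by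
    have h := PySem.Dict.items_foldl_insert_fresh c Prod.fst
      (fun kv => pvDedup kv.2 (PySem.Dict.getD (pvRev (pvEdges c)) kv.1 []))
      PySem.Dict.empty (fun a _ => PySem.Dict.contains_empty a.1) hc
    simpa using h
  have hg : (List.foldl (fun out p => if (PySem.Dict.get? out p.1).isSome then out
        else PySem.Dict.insert out p.1 (pvDedup [] p.2))
        (List.foldl (fun out kv => PySem.Dict.insert out kv.1
          (pvDedup kv.2 (PySem.Dict.getD (pvRev (pvEdges c)) kv.1 [])))
          PySem.Dict.empty c)
        (pvRev (pvEdges c)).items).items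
      = (List.foldl (fun out kv => PySem.Dict.insert out kv.1
          (pvDedup kv.2 (PySem.Dict.getD (pvRev (pvEdges c)) kv.1 [])))
          PySem.Dict.empty c).items ++
        ((pvRev (pvEdges c)).items.filter (fun p =>
          !((List.foldl (fun out kv => PySem.Dict.insert out kv.1
            (pvDedup kv.2 (PySem.Dict.getD (pvRev (pvEdges c)) kv.1 [])))
            PySem.Dict.empty c).contains p.1))).map (fun p => (p.1, pvDedup [] p.2)) :=
    pv_fold_guard (pvRev (pvEdges c)).items _ (fun p => pvDedup [] p.2) hndR
  rw [hg]
  have hcont : ∀ x : Int, (List.foldl (fun out kv => PySem.Dict.insert out kv.1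
        (pvDedup kv.2 (PySem.Dict.getD (pvRev (pvEdges c)) kv.1 [])))
        PySem.Dict.empty c).contains x = (c.map Prod.fst).contains x := by
    intro x
    rw [PySem.Dict.contains_eq_decide_mem_keys]
    have hk : (List.foldl (fun out kv => PySem.Dict.insert out kv.1
          (pvDedup kv.2 (PySem.Dict.getD (pvRev (pvEdges c)) kv.1 [])))
          PySem.Dict.empty c).keys = c.map Prod.fst := by
      show (List.foldl (fun out kv => PySem.Dict.insert out kv.1
          (pvDedup kv.2 (PySem.Dict.getD (pvRev (pvEdges c)) kv.1 [])))
          PySem.Dict.empty c).items.map Prod.fst = _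
      rw [hout1, List.map_map]
      exact List.map_congr_left (fun p _ => rfl)
    rw [hk]
    exact (List.contains_eq_mem x (c.map Prod.fst)).symm
  have hfc : ((pvRev (pvEdges c)).items.filter (fun p =>
        !((List.foldl (fun out kv => PySem.Dict.insert out kv.1
          (pvDedup kv.2 (PySem.Dict.getD (pvRev (pvEdges c)) kv.1 [])))
          PySem.Dict.empty c).contains p.1)))
      = ((pvRev (pvEdges c)).items.filter (fun p => !((c.map Prod.fst).contains p.1))) :=
    List.filter_congr (fun p _ => by rw [hcont p.1])
  rw [hfc, hout1]
  rfl

-- ===== VERDICT (by name: the statement is the Claim_ definition above) =====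
theorem directedToUndirected_spec : Claim_equal_directedToUndirected := by
  intro c _ hpre
  unfold Spec_directedToUndirected
  rw [pvA_eq c hpre, pvB_eq c hpre, pvScatter_eq c hpre]
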